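-- pv_equiv track=rewrite | github.com/anaroste/piscine_python | d03/ex00/NumPyCreator.py | check_all_elt_len
-- ===== SOURCE A (Python) =====
-- def check_all_elt_len(itr):
--     if len(itr) == 0:
--         return True
--     len_elt = len(itr[0])
--     for elt in itr:
--         if len(elt) != len_elt:
--             return False
--     return True
-- ===== SOURCE B (Python) =====
-- def check_all_elt_len(itr):
--     if len(itr) == 0:
--         return True
--     return len({len(elt) for elt in itr}) <= 1
-- ===== Notes on version B (the rewrite author's own statement) =====
-- stated objective: simpler
-- what changed: Replaces the reference-element comparison loop with early exit by collecting the set of all element lengths in one comprehension and testing that its cardinality is at most 1.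
import Mathlib
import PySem

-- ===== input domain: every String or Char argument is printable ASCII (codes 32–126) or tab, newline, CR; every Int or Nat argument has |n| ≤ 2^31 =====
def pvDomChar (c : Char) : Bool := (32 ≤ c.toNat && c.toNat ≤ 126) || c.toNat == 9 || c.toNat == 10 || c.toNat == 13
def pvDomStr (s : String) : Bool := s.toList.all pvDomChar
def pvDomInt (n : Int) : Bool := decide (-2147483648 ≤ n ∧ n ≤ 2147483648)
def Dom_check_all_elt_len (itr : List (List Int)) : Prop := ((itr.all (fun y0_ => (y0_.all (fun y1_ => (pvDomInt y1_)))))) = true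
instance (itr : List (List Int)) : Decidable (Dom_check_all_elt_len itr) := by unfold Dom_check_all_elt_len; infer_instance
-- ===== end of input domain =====

-- B replaces A's compare-against-first loop with 'cardinality of the set of all lengths ≤ 1' (simpler decomposition, same cost).

-- ===== PORT A =====
-- the 'for elt in itr' loop with its early 'return False'
def checkLoopA (len_elt : Nat) : List (List Int) → Bool
  | [] => true
  | elt :: rest => if elt.length ≠ len_elt then false else checkLoopA len_elt rest

def check_all_elt_len (itr : List (List Int)) : Bool :=
  if itr.length = 0 then true
  else
    let len_elt := (itr.headI).length   -- itr[0]; itr nonempty here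
    checkLoopA len_elt itr

-- ===== PORT B =====
def check_all_elt_len_alt (itr : List (List Int)) : Bool :=
  if itr.length = 0 then true
  else decide ((PySem.Set.ofList (itr.map (fun elt => (elt.length : Int)))).length ≤ 1)

-- ===== PRECONDITION & SPEC =====
def Spec_check_all_elt_len (itr : List (List Int)) (out : Bool) : Prop := out = check_all_elt_len_alt itr
instance (itr : List (List Int)) (out : Bool) : Decidable (Spec_check_all_elt_len itr out) := by unfold Spec_check_all_elt_len; infer_instance

-- ===== CLAIM (what is proved, stated in full; the proofs are below) =====
def Claim_equal_check_all_elt_len : Prop := ∀ (itr : List (List Int)), Dom_check_all_elt_len itr → Spec_check_all_elt_len itr (check_all_elt_len itr)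

-- ===== LEMMAS AND PROOFS =====

-- A's loop is 'every element has length len_elt'
theorem checkLoopA_eq_all (n : Nat) (l : List (List Int)) :
    checkLoopA n l = l.all (fun e => e.length == n) := by
  induction l with
  | nil => rfl
  | cons e rest ih =>
    simp only [checkLoopA, List.all_cons, ih]
    by_cases h : e.length = n <;> simp [h]

-- a Nodup list has length ≤ 1 iff all its members coincide
theorem nodup_length_le_one {α : Type} (l : List α) (hnd : l.Nodup) :
    l.length ≤ 1 ↔ ∀ a ∈ l, ∀ b ∈ l, a = b := by
  match l with
  | [] => simp
  | [a] => simp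
  | a :: b :: rest =>
    simp only [List.nodup_cons] at hnd
    constructor
    · intro h; simp at h
    · intro h
      exact absurd (h a (by simp) b (by simp)) (by
        intro hab
        exact hnd.1 (by simp [hab]))

-- B's set test is 'every element has the head's length' (for nonempty itr)
theorem setB_iff (x : List Int) (xs : List (List Int)) :
    ((PySem.Set.ofList ((x :: xs).map (fun elt => (elt.length : Int)))).length ≤ 1)
      ↔ ∀ e ∈ x :: xs, e.length = x.length := by
  rw [nodup_length_le_one _ (PySem.Set.nodup_ofList _)]
  constructor
  · intro h e he
    have hx : (x.length : Int) ∈ PySem.Set.ofList ((x :: xs).map (fun elt => (elt.length : Int))) := by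
      rw [PySem.Set.mem_ofList]; exact List.mem_map_of_mem (a := x) (by simp)
    have he' : (e.length : Int) ∈ PySem.Set.ofList ((x :: xs).map (fun elt => (elt.length : Int))) := by
      rw [PySem.Set.mem_ofList]; exact List.mem_map_of_mem (a := e) he
    exact_mod_cast h _ he' _ hx
  · intro h a ha b hb
    rw [PySem.Set.mem_ofList, List.mem_map] at ha hb
    obtain ⟨ea, hea, rfl⟩ := ha
    obtain ⟨eb, heb, rfl⟩ := hb
    rw [h ea hea, h eb heb]

-- ===== VERDICT (by name: the statement is the Claim_ definition above) =====
theorem check_all_elt_len_spec : Claim_equal_check_all_elt_len := by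
  intro itr _
  unfold Spec_check_all_elt_len check_all_elt_len check_all_elt_len_alt
  cases itr with
  | nil => rfl
  | cons x xs =>
    have hne : (x :: xs).length ≠ 0 := by simp
    rw [if_neg hne, if_neg hne]
    simp only [List.headI]
    rw [checkLoopA_eq_all]
    have := setB_iff x xs
    by_cases h : ∀ e ∈ x :: xs, e.length = x.length
    · rw [decide_eq_true (this.mpr h)]
      rw [List.all_eq_true]
      intro e he
      exact beq_iff_eq.mpr (h e he)
    · rw [decide_eq_false (fun hc => h (this.mp hc))]
      rw [Bool.eq_false_iff]
      intro hc
      rw [List.all_eq_true] at hc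
      exact h (fun e he => beq_iff_eq.mp (hc e he))
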